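-- pv_equiv track=rewrite | github.com/Girin7716/PythonCoding | Etc/KakaoCodingTest/2019_winter_intern/3.py | solution
-- ===== SOURCE A (Python) =====
-- from itertools import permutations
--
-- def isMatchId(ban_id, user_id):
--     for i in range(len(ban_id)):
--         if ban_id[i] == '*':    continue
--         elif ban_id[i] != user_id[i]:
--             return False
--     return True
--
-- def check(banned_ids, candidate_uesrs):
--     for i in range(len(banned_ids)):
--         if len(banned_ids[i]) != len(candidate_uesrs[i]):
--             return False
--         if isMatchId(banned_ids[i],candidate_uesrs[i]) is False:
--             return False
--     return True
--
-- def solution(user_ids, banned_ids):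
--     ans = list()
--
--     for candidate_users in permutations(user_ids,len(banned_ids)):
--         if check(banned_ids,candidate_users) is True:
--             candidate_users = set(candidate_users)
--             if candidate_users not in ans:
--                 ans.append(candidate_users)
--
--     return len(ans)
-- ===== SOURCE B (Python) =====
-- def solution(user_ids, banned_ids):
--     def matches(ban, uid):
--         return len(ban) == len(uid) and all(b == '*' or b == c for b, c in zip(ban, uid))
--
--     cands = [[j for j in range(len(user_ids)) if matches(b, user_ids[j])]
--              for b in banned_ids]
--
--     def tuples(k, used):
--         if k == len(cands):
--             return [used]
--         out = []
--         for j in cands[k]: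
--             if j not in used:
--                 out.extend(tuples(k + 1, used + [j]))
--         return out
--
--     results = set()
--     for t in tuples(0, []):
--         results.add(tuple(sorted({user_ids[j] for j in t})))
--     return len(results)
-- ===== Notes on version B (the rewrite author's own statement) =====
-- stated objective: faster
-- what changed: Instead of enumerating all length-r permutations of user_ids and filtering each with check, B precomputes for every banned pattern the list of matching user indices and combines them by backtracking that prunes non-matching prefixes, deduplicating results on a sorted canonical form of the user set; intended as faster (a timing run saw A time out at n=16 where B returned; no clean ratio was measurable at sizes both finish).
import Mathlib
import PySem

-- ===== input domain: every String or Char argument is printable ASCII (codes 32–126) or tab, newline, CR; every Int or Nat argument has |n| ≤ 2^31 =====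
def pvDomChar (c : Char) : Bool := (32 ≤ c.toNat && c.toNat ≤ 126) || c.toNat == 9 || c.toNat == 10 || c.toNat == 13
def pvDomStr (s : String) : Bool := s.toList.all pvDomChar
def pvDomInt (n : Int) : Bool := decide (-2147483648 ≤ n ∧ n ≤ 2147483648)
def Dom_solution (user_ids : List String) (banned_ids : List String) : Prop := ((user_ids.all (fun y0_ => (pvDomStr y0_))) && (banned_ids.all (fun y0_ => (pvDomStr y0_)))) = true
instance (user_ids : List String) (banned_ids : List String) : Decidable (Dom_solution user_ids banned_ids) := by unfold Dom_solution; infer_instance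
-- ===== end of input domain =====

-- B replaces A's enumerate-all-permutations-and-filter with per-pattern candidate index lists
-- combined by pruned backtracking, deduplicating on a sorted canonical form (intended as faster:
-- a timing run saw A time out at n=16 where B returned; no clean ratio at sizes both finish).

-- ===== PORT A =====
-- isMatchId: loop over range(len(ban)); indexing via getD — exact at every call site, where check
-- has already ensured equal lengths, so every index is in range
def isMatchId (ban : List Char) (uid : List Char) : Bool :=
  (List.range ban.length).all (fun i =>
    ban.getD i ' ' == '*' || ban.getD i ' ' == uid.getD i ' ')

-- check: loop over range(len(banned)); indexing via getD — in range at every call site, since the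
-- candidates come from permutations(user_ids, len(banned_ids)) and so have length len(banned_ids)
def check (banned : List String) (cand : List String) : Bool :=
  (List.range banned.length).all (fun i =>
    PySem.Str.len (banned.getD i "") == PySem.Str.len (cand.getD i "") &&
    isMatchId (banned.getD i "").toList (cand.getD i "").toList)

def solution (user_ids : List String) (banned_ids : List String) : Int :=
  let ans : List (PySem.Set String) :=
    (PySem.List.permutations user_ids banned_ids.length).foldl
      (fun ans t =>
        if check banned_ids t then
          let cu := PySem.Set.ofList t
          if ans.any (fun s => PySem.Set.equal s cu) then ans else ans ++ [cu]
        else ans) []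
  (ans.length : Int)

-- ===== PORT B =====
def matchesB (ban : List Char) (uid : List Char) : Bool :=
  ban.length == uid.length && (ban.zip uid).all (fun p => p.1 == '*' || p.1 == p.2)

def candLists (user_ids : List String) (banned_ids : List String) : List (List Nat) :=
  banned_ids.map (fun b =>
    (List.range user_ids.length).filter (fun j => matchesB b.toList (user_ids.getD j "").toList))

def altTuples : List (List Nat) → List Nat → List (List Nat)
  | [], used => [used]
  | c :: cs, used =>
      (c.filter (fun j => !used.contains j)).flatMap (fun j => altTuples cs (used ++ [j]))

-- tuple(sorted({user_ids[j] for j in t})): indexing via getD — every j comes from range(len(user_ids))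
def canonOf (user_ids : List String) (t : List Nat) : List String :=
  PySem.List.sorted (PySem.Set.ofList (t.map (fun j => user_ids.getD j ""))) (fun x => x) false

def solution_alt (user_ids : List String) (banned_ids : List String) : Int :=
  let results : PySem.Set (List String) :=
    (altTuples (candLists user_ids banned_ids) []).foldl
      (fun s t => PySem.Set.add s (canonOf user_ids t)) PySem.Set.empty
  PySem.Set.len results

-- ===== PRECONDITION & SPEC =====
def Spec_solution (user_ids : List String) (banned_ids : List String) (out : Int) : Prop := out = solution_alt user_ids banned_ids
instance (user_ids : List String) (banned_ids : List String) (out : Int) : Decidable (Spec_solution user_ids banned_ids out) := by unfold Spec_solution; infer_instance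

-- ===== CLAIM (what is proved, stated in full; the proofs are below) =====
def Claim_equal_solution : Prop := ∀ (user_ids : List String) (banned_ids : List String), Dom_solution user_ids banned_ids → Spec_solution user_ids banned_ids (solution user_ids banned_ids)

-- ===== LEMMAS AND PROOFS =====

def MatchesP (b : List Char) (u : List Char) : Prop :=
  b.length = u.length ∧ ∀ k, k < b.length → (b.getD k ' ' = '*' ∨ b.getD k ' ' = u.getD k ' ')

lemma isMatch_iff (b c : List Char) :
    isMatchId b c = true ↔ ∀ k, k < b.length → (b.getD k ' ' = '*' ∨ b.getD k ' ' = c.getD k ' ') := by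
  simp [isMatchId, List.all_eq_true, List.mem_range]

lemma matchesB_iff (b c : List Char) : matchesB b c = true ↔ MatchesP b c := by
  simp only [matchesB, MatchesP, Bool.and_eq_true, beq_iff_eq, List.all_eq_true]
  constructor
  · rintro ⟨hl, h⟩
    refine ⟨hl, fun k hk => ?_⟩
    have hkc : k < c.length := by omega
    have hmem : (b.getD k ' ', c.getD k ' ') ∈ b.zip c := by
      rw [List.getD_eq_getElem b ' ' hk, List.getD_eq_getElem c ' ' hkc, List.mem_iff_getElem]
      refine ⟨k, by simp [List.length_zip]; omega, ?_⟩
      simp [List.getElem_zip]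
    simpa using h _ hmem
  · rintro ⟨hl, h⟩
    refine ⟨hl, fun p hp => ?_⟩
    rw [List.mem_iff_getElem] at hp
    obtain ⟨k, hk, rfl⟩ := hp
    have hkb : k < b.length := by simp [List.length_zip] at hk; omega
    have hkc : k < c.length := by simp [List.length_zip] at hk; omega
    have := h k hkb
    rw [List.getD_eq_getElem b ' ' hkb, List.getD_eq_getElem c ' ' hkc] at this
    simpa [List.getElem_zip] using this

lemma strMatch_iff (b t0 : String) :
    ((PySem.Str.len b == PySem.Str.len t0) && isMatchId b.toList t0.toList) = true
      ↔ matchesB b.toList t0.toList = true := by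
  simp [PySem.Str.len_eq, isMatch_iff, matchesB_iff, MatchesP]

lemma check_iff (banned : List String) (t : List String) (hlen : t.length = banned.length) :
    check banned t = true ↔
      ∀ k (h : k < banned.length), matchesB (banned[k]).toList (t[k]'(by omega)).toList = true := by
  simp only [check, List.all_eq_true, List.mem_range]
  constructor
  · intro h k hk
    have := h k hk
    rw [List.getD_eq_getElem banned "" hk, List.getD_eq_getElem t "" (by omega)] at this
    exact (strMatch_iff _ _).mp this
  · intro h k hk
    rw [List.getD_eq_getElem banned "" hk, List.getD_eq_getElem t "" (by omega)]
    exact (strMatch_iff _ _).mpr (h k hk)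

def ChainSel : List (List Nat) → List Nat → List Nat → Prop
  | [], _, tail => tail = []
  | c :: cs, used, tail => ∃ j t', tail = j :: t' ∧ j ∈ c ∧ j ∉ used ∧ ChainSel cs (used ++ [j]) t'

lemma mem_altTuples (cs : List (List Nat)) :
    ∀ used js, js ∈ altTuples cs used ↔ ∃ tail, js = used ++ tail ∧ ChainSel cs used tail := by
  induction cs with
  | nil =>
    intro used js
    simp [altTuples, ChainSel]
  | cons c cs ih =>
    intro used js
    simp only [altTuples, List.mem_flatMap, List.mem_filter, ChainSel]
    constructor
    · rintro ⟨j, ⟨hjc, hjnu⟩, hmem⟩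
      obtain ⟨tail, rfl, hchain⟩ := (ih _ _).mp hmem
      exact ⟨j :: tail, by simp, j, tail, rfl, hjc, by simpa using hjnu, hchain⟩
    · rintro ⟨tail, rfl, j, t', rfl, hjc, hjnu, hchain⟩
      exact ⟨j, ⟨hjc, by simpa using hjnu⟩, (ih _ _).mpr ⟨t', by simp, hchain⟩⟩

lemma chainSel_iff (cs : List (List Nat)) :
    ∀ used tail, used.Nodup →
      (ChainSel cs used tail ↔ tail.length = cs.length ∧ (used ++ tail).Nodup ∧
        ∀ k (h : k < cs.length), tail.getD k 0 ∈ cs[k]) := by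
  induction cs with
  | nil =>
    intro used tail hnd
    simp only [ChainSel, List.length_nil]
    constructor
    · rintro rfl; simpa using hnd
    · rintro ⟨hlen, _, _⟩; exact List.eq_nil_of_length_eq_zero hlen
  | cons c cs ih =>
    intro used tail hnd
    simp only [ChainSel, List.length_cons]
    constructor
    · rintro ⟨j, t', rfl, hjc, hjnu, hchain⟩
      have hnd' : (used ++ [j]).Nodup := by
        simp only [List.nodup_append, List.nodup_cons]
        exact ⟨hnd, by simp, fun a ha => by simp; rintro rfl; exact hjnu ha⟩
      obtain ⟨hlen, hnd2, hmem⟩ := (ih _ _ hnd').mp hchain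
      refine ⟨by simp [hlen], by simpa [List.append_assoc] using hnd2, ?_⟩
      intro k hk
      cases k with
      | zero => simpa using hjc
      | succ k => simpa using hmem k (by omega)
    · rintro ⟨hlen, hnd2, hmem⟩
      cases tail with
      | nil => simp at hlen
      | cons j t' =>
        have hjc : j ∈ c := by simpa using hmem 0 (by omega)
        have hnd2' : ((used ++ [j]) ++ t').Nodup := by simpa [List.append_assoc] using hnd2
        have hjnu : j ∉ used := fun hj =>
          (List.disjoint_of_nodup_append hnd2) hj (by exact List.mem_cons_self)
        have hnd' : (used ++ [j]).Nodup := (List.nodup_append).mp hnd2' |>.1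
        refine ⟨j, t', rfl, hjc, hjnu, (ih _ _ hnd').mpr ⟨by simpa using hlen, hnd2', ?_⟩⟩
        intro k hk
        simpa using hmem (k+1) (by omega)

lemma mem_permutations_iff (xs : List String) (r : Nat) (t : List String) :
    t ∈ PySem.List.permutations xs r ↔
      ∃ js : List Nat, js.Nodup ∧ js.length = r ∧ (∀ j ∈ js, j < xs.length) ∧
        t = js.map (fun j => xs.getD j "") := by
  induction r generalizing xs t with
  | zero =>
    rw [PySem.List.permutations_zero]
    constructor
    · intro h
      simp at h
      exact ⟨[], by simp [h]⟩
    · rintro ⟨js, _, hlen, _, rfl⟩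
      simp [List.eq_nil_of_length_eq_zero hlen]
  | succ r ih =>
    rw [PySem.List.permutations_succ]
    simp only [List.mem_flatMap, List.mem_range]
    constructor
    · rintro ⟨i, hi, hmem⟩
      rw [List.getElem?_eq_getElem hi] at hmem
      simp only [List.mem_map] at hmem
      obtain ⟨p, hp, rfl⟩ := hmem
      obtain ⟨js', hnd', hlen', hb', rfl⟩ := (ih _ _).mp hp
      have herase : (xs.eraseIdx i).length = xs.length - 1 := by
        rw [List.length_eraseIdx]; simp [hi]
      refine ⟨i :: js'.map (fun j => if j < i then j else j + 1), ?_, ?_, ?_, ?_⟩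
      · rw [List.nodup_cons]
        constructor
        · simp only [List.mem_map]
          rintro ⟨j, hj, hji⟩
          by_cases h : j < i <;> simp [h] at hji <;> omega
        · exact hnd'.map (fun a b hab => by split_ifs at hab <;> omega)
      · simp [hlen']
      · intro j hj
        rcases List.mem_cons.mp hj with rfl | hj
        · exact hi
        · simp only [List.mem_map] at hj
          obtain ⟨j', hj', rfl⟩ := hj
          have := hb' j' hj'
          split_ifs <;> omega
      · rw [List.map_cons, List.map_map]
        congr 1
        · rw [List.getD_eq_getElem xs "" hi]
        · refine List.map_congr_left (fun j' hj' => ?_)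
          have hj'lt : j' < (xs.eraseIdx i).length := hb' j' hj'
          dsimp only [Function.comp]
          rw [List.getD_eq_getElem _ "" hj'lt]
          by_cases h : j' < i
          · simp only [h, if_pos]
            rw [List.getD_eq_getElem xs "" (by omega), List.getElem_eraseIdx]
            simp [h]
          · simp only [h, if_false]
            rw [List.getD_eq_getElem xs "" (by omega), List.getElem_eraseIdx]
            simp [h]
    · rintro ⟨js, hnd, hlen, hb, rfl⟩
      cases js with
      | nil => exact absurd hlen (by simp)
      | cons j rest =>
        have hj : j < xs.length := hb j (by simp)
        have hjrest : j ∉ rest := (List.nodup_cons.mp hnd).1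
        have hndrest : rest.Nodup := (List.nodup_cons.mp hnd).2
        refine ⟨j, hj, ?_⟩
        rw [List.getElem?_eq_getElem hj]
        simp only [List.mem_map]
        have herase : (xs.eraseIdx j).length = xs.length - 1 := by
          rw [List.length_eraseIdx]; simp [hj]
        refine ⟨(rest.map (fun k => if k < j then k else k - 1)).map
            (fun j' => (xs.eraseIdx j).getD j' ""), ?_, ?_⟩
        · apply (ih _ _).mpr
          refine ⟨rest.map (fun k => if k < j then k else k - 1), ?_, by simpa using hlen, ?_, rfl⟩
          · refine List.Nodup.map_on ?_ hndrest
            intro k1 hk1 k2 hk2 hk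
            have h1 : k1 ≠ j := fun h => hjrest (h ▸ hk1)
            have h2 : k2 ≠ j := fun h => hjrest (h ▸ hk2)
            split_ifs at hk <;> omega
          · intro k' hk'
            simp only [List.mem_map] at hk'
            obtain ⟨k, hk, rfl⟩ := hk'
            have hkn : k < xs.length := hb k (by simp [hk])
            have hkj : k ≠ j := fun h => hjrest (h ▸ hk)
            rw [herase]
            split_ifs <;> omega
        · rw [List.map_map, List.map_cons]
          congr 1
          · rw [List.getD_eq_getElem xs "" hj]
          · refine (List.map_congr_left (fun k hk => ?_)).symm
            have hkn : k < xs.length := hb k (by simp [hk])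
            have hkj : k ≠ j := fun h => hjrest (h ▸ hk)
            change xs.getD k "" = (xs.eraseIdx j).getD (if k < j then k else k - 1) ""
            by_cases h : k < j
            · rw [if_pos h, List.getD_eq_getElem xs "" hkn,
                List.getD_eq_getElem _ "" (by rw [herase]; omega), List.getElem_eraseIdx, dif_pos h]
            · have h2 : ¬ (k - 1 < j) := by omega
              rw [if_neg h, List.getD_eq_getElem xs "" hkn,
                List.getD_eq_getElem _ "" (by rw [herase]; omega), List.getElem_eraseIdx, dif_neg h2]
              congr 1
              omega

def canonS (s : List String) : List String := PySem.List.sorted s (fun x => x) false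

lemma equal_iff_canonS (u t : List String) :
    PySem.Set.equal (PySem.Set.ofList u) (PySem.Set.ofList t) = true ↔
      canonS (PySem.Set.ofList u) = canonS (PySem.Set.ofList t) := by
  rw [PySem.Set.equal_iff, canonS, canonS, PySem.List.sorted_id_eq_sorted_id_iff_perm,
    List.perm_ext_iff_of_nodup (PySem.Set.nodup_ofList u) (PySem.Set.nodup_ofList t)]

lemma length_ofList_eq_card (l : List (List String)) :
    (PySem.Set.ofList l).length = l.toFinset.card := by
  rw [← List.toFinset_card_of_nodup (PySem.Set.nodup_ofList l)]
  congr 1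
  ext x
  simp [List.mem_toFinset, PySem.Set.mem_ofList]

lemma foldA_map (chk : List String → Bool) :
    ∀ (ts : List (List String)) (init : List (PySem.Set String)),
      (∀ s ∈ init, ∃ u, s = PySem.Set.ofList u) →
      (ts.foldl (fun ans t =>
        if chk t then
          let cu := PySem.Set.ofList t
          if ans.any (fun s => PySem.Set.equal s cu) then ans else ans ++ [cu]
        else ans) init).map canonS
      = PySem.Set.update (init.map canonS)
          ((ts.filter chk).map (fun t => canonS (PySem.Set.ofList t))) := by
  intro ts
  induction ts with
  | nil => intro init _; simp [PySem.Set.update_nil]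
  | cons t ts ih =>
    intro init hinv
    rw [List.foldl_cons, List.filter_cons]
    by_cases hc : chk t
    · simp only [hc, if_true, List.map_cons, PySem.Set.update_cons]
      have hany : init.any (fun s => PySem.Set.equal s (PySem.Set.ofList t))
          = (init.map canonS).contains (canonS (PySem.Set.ofList t)) := by
        rw [Bool.eq_iff_iff, List.any_eq_true, List.contains_iff_mem, List.mem_map]
        constructor
        · rintro ⟨s, hs, heq⟩
          obtain ⟨u, rfl⟩ := hinv s hs
          exact ⟨_, hs, ((equal_iff_canonS u t).mp heq).symm ▸ rfl⟩
        · rintro ⟨s, hs, heq⟩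
          obtain ⟨u, rfl⟩ := hinv s hs
          exact ⟨_, hs, (equal_iff_canonS u t).mpr heq⟩
      rw [hany]
      by_cases hmem : (init.map canonS).contains (canonS (PySem.Set.ofList t)) = true
      · rw [if_pos hmem]
        rw [ih init hinv]
        congr 1
        rw [PySem.Set.add_of_mem]
        rw [List.contains_iff_mem] at hmem
        exact hmem
      · rw [if_neg hmem]
        rw [ih (init ++ [PySem.Set.ofList t]) (by
          intro s hs
          rcases List.mem_append.mp hs with h | h
          · exact hinv s h
          · exact ⟨t, by simpa using h⟩)]
        congr 1
        rw [PySem.Set.add_of_not_mem, List.map_append, List.map_cons, List.map_nil]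
        rw [List.contains_iff_mem] at hmem
        exact fun h => hmem h
    · simp only [hc, if_false, Bool.false_eq_true]
      exact ih init hinv

-- the combinatorial bridge
lemma bridge (user_ids banned_ids : List String) (x : List String) :
    (∃ t, (t ∈ PySem.List.permutations user_ids banned_ids.length ∧ check banned_ids t = true)
        ∧ canonS (PySem.Set.ofList t) = x)
      ↔ (∃ js ∈ altTuples (candLists user_ids banned_ids) [], canonOf user_ids js = x) := by
  have hcslen : (candLists user_ids banned_ids).length = banned_ids.length := by
    simp [candLists]
  constructor
  · rintro ⟨t, ⟨hperm, hchk⟩, rfl⟩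
    obtain ⟨js, hnd, hlen, hb, rfl⟩ := (mem_permutations_iff _ _ _).mp hperm
    have hmlen : (js.map (fun j => user_ids.getD j "")).length = banned_ids.length := by
      simpa using hlen
    refine ⟨js, ?_, ?_⟩
    · rw [mem_altTuples]
      refine ⟨js, by simp, ?_⟩
      rw [chainSel_iff _ _ _ (by simp)]
      refine ⟨by simp [hcslen, hlen], by simpa using hnd, ?_⟩
      intro k hk
      have hkb : k < banned_ids.length := by omega
      have hkj : k < js.length := by omega
      rw [List.getD_eq_getElem js 0 hkj]
      have hcand : (candLists user_ids banned_ids)[k] =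
          (List.range user_ids.length).filter
            (fun j => matchesB (banned_ids[k]'hkb).toList (user_ids.getD j "").toList) := by
        simp [candLists]
      rw [hcand, List.mem_filter, List.mem_range]
      refine ⟨hb _ (by simp), ?_⟩
      have := (check_iff banned_ids _ hmlen).mp hchk k hkb
      simpa using this
    · rfl
  · rintro ⟨js, hjs, rfl⟩
    rw [mem_altTuples] at hjs
    obtain ⟨tail, htl, hchain⟩ := hjs
    simp only [List.nil_append] at htl
    subst htl
    rw [chainSel_iff _ _ _ (by simp)] at hchain
    simp only [List.nil_append] at hchain
    obtain ⟨hlen, hnd, hmem⟩ := hchain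
    have hlen' : js.length = banned_ids.length := by omega
    have hb : ∀ j ∈ js, j < user_ids.length := by
      intro j hj
      obtain ⟨k, hk, rfl⟩ := List.mem_iff_getElem.mp hj
      have hk' : k < (candLists user_ids banned_ids).length := by omega
      have := hmem k hk'
      rw [List.getD_eq_getElem js 0 hk] at this
      have hkb : k < banned_ids.length := by omega
      rw [show (candLists user_ids banned_ids)[k] =
          (List.range user_ids.length).filter
            (fun j => matchesB (banned_ids[k]'hkb).toList (user_ids.getD j "").toList) by
        simp [candLists]] at this
      exact List.mem_range.mp (List.mem_filter.mp this).1
    refine ⟨js.map (fun j => user_ids.getD j ""), ⟨?_, ?_⟩, rfl⟩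
    · exact (mem_permutations_iff _ _ _).mpr ⟨js, hnd, hlen', hb, rfl⟩
    · rw [check_iff banned_ids _ (by simpa using hlen')]
      intro k hk
      have hkj : k < js.length := by omega
      have hk' : k < (candLists user_ids banned_ids).length := by omega
      have := hmem k hk'
      rw [List.getD_eq_getElem js 0 hkj] at this
      rw [show (candLists user_ids banned_ids)[k] =
          (List.range user_ids.length).filter
            (fun j => matchesB (banned_ids[k]'hk).toList (user_ids.getD j "").toList) by
        simp [candLists]] at this
      have hmk := (List.mem_filter.mp this).2
      simpa using hmk

lemma solutions_agree (user_ids banned_ids : List String) :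
    solution user_ids banned_ids = solution_alt user_ids banned_ids := by
  have hA : solution user_ids banned_ids =
      (((((PySem.List.permutations user_ids banned_ids.length).filter
          (check banned_ids)).map (fun t => canonS (PySem.Set.ofList t))).toFinset.card : Nat) : Int) := by
    have hdef : solution user_ids banned_ids =
        (((PySem.List.permutations user_ids banned_ids.length).foldl
          (fun ans t =>
            if check banned_ids t then
              if ans.any (fun s => PySem.Set.equal s (PySem.Set.ofList t)) then ans
              else ans ++ [PySem.Set.ofList t]
            else ans) []).length : Int) := rfl
    have hmap := foldA_map (check banned_ids)
      (PySem.List.permutations user_ids banned_ids.length) [] (by simp)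
    simp only [List.map_nil] at hmap
    rw [PySem.Set.update_nil_left] at hmap
    have hlen : ∀ (l : List (PySem.Set String)), l.length = (l.map canonS).length := by
      simp
    rw [hdef, hlen _, hmap, length_ofList_eq_card]
  have hB : solution_alt user_ids banned_ids =
      ((((altTuples (candLists user_ids banned_ids) []).map
          (canonOf user_ids)).toFinset.card : Nat) : Int) := by
    unfold solution_alt
    rw [PySem.Set.len_eq]
    congr 1
    rw [← PySem.Set.update_map_eq_foldl_add, PySem.Set.empty_eq, PySem.Set.update_nil_left,
      length_ofList_eq_card]
  rw [hA, hB]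
  congr 2
  ext x
  simp only [List.mem_toFinset, List.mem_map, List.mem_filter]
  constructor
  · rintro ⟨t, ⟨h1, h2⟩, h3⟩
    obtain ⟨js, hjs, h⟩ := (bridge user_ids banned_ids x).mp ⟨t, ⟨h1, h2⟩, h3⟩
    exact ⟨js, hjs, h⟩
  · rintro ⟨js, h1, h2⟩
    exact (bridge user_ids banned_ids x).mpr ⟨js, h1, h2⟩

-- ===== VERDICT (by name: the statement is the Claim_ definition above) =====
theorem solution_spec : Claim_equal_solution := by
  intro user_ids banned_ids _
  unfold Spec_solution
  exact solutions_agree user_ids banned_ids
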